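-- pv_equiv track=rewrite | github.com/kirilloschepkov/Yandex-Contest | Тренировки по алгоритмам 3/Дивизион А/29. Движение по полосам/solution.py | f
-- ===== SOURCE A (Python) =====
-- def f(m, n: int) -> int:
--     dp = [1] * (m + 1)
--     dp[0] = 0
--     for _ in range(n - 1):
--         current = dp.copy()
--         for k in range(1, m + 1):
--             dp[k] = 0
--             for i in range(k):
--                 dp[k] += current[i] + current[i + 1]
--     return dp[-1]
-- ===== SOURCE B (Python) =====
-- def f(m, n: int) -> int:
--     row = [0] + [1] * m
--     for _ in range(n - 1):
--         new = [0] * (m + 1)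
--         s = 0
--         for k in range(1, m + 1):
--             s += row[k - 1] + row[k]
--             new[k] = s
--         row = new
--     return row[-1]
-- ===== Notes on version B (the rewrite author's own statement) =====
-- stated objective: faster
-- what changed: A recomputes each new dp[k] with an inner loop over all i < k (quadratic per row); B builds each new row in one pass with a running prefix sum s += row[k-1] + row[k].
-- outside the precondition, e.g. on f(-1, 0): A raises IndexError, B returns 0
-- crash fix: For m < 0 with n <= 1 the Python A raises IndexError (dp[0] = 0 on the empty list [1]*(m+1)) while B returns 0 (its row is just [0]). — e.g. on f(-1, 0): A raises IndexError, B returns 0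
import Mathlib
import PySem

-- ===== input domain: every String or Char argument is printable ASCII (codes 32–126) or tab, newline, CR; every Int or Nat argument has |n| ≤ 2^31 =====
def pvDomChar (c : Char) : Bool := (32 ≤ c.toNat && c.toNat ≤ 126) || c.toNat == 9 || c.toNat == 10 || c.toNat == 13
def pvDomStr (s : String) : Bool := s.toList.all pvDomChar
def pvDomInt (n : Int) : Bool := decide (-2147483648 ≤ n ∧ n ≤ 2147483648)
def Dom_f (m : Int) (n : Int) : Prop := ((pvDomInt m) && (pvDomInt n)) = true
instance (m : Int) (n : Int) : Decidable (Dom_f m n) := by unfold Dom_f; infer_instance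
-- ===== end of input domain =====

-- B replaces A's per-row inner summation loop by a running prefix sum per row;
-- equivalence of return values is proved for all m ≥ 0 (A raises IndexError for m < 0).

-- ===== PORT A =====
-- literal transliteration of A: dp = [1]*(m+1); dp[0] = 0; for _ in range(n-1):
--   current = dp.copy(); for k in range(1, m+1): dp[k] = 0; for i in range(k): dp[k] += current[i] + current[i+1]
-- return dp[-1].  Indexing uses the total pyGetD/pySetD forms with default; out-of-range
-- accesses are only reachable for m < 0, which Pre_f excludes (Python raises IndexError there).
def f (m : Int) (n : Int) : Int :=
  let dp0 : List Int := PySem.List.pySetD (List.replicate (m + 1).toNat 1) 0 0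
  let dp := (PySem.List.pyRange 0 (n - 1) 1).foldl (fun dp _ =>
    let current := dp
    (PySem.List.pyRange 1 (m + 1) 1).foldl (fun dp k =>
      PySem.List.pySetD dp k
        ((PySem.List.pyRange 0 k 1).foldl
          (fun acc i => acc + (PySem.List.pyGetD current i 0 + PySem.List.pyGetD current (i + 1) 0)) 0)) dp) dp0
  PySem.List.pyGetD dp (-1) 0

-- ===== PORT B =====
-- literal transliteration of B (Source B): row = [0] + [1]*m; for _ in range(n-1):
--   new = [0]*(m+1); s = 0; for k in range(1, m+1): s += row[k-1] + row[k]; new[k] = s; row = new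
-- return row[-1].  Same total indexing convention as the port of A; only m < 0 is affected.
def f_alt (m : Int) (n : Int) : Int :=
  let row0 : List Int := 0 :: List.replicate m.toNat 1
  let row := (PySem.List.pyRange 0 (n - 1) 1).foldl (fun row _ =>
    ((PySem.List.pyRange 1 (m + 1) 1).foldl
      (fun (st : Int × List Int) k =>
        let s := st.1 + (PySem.List.pyGetD row (k - 1) 0 + PySem.List.pyGetD row k 0)
        (s, PySem.List.pySetD st.2 k s))
      (0, List.replicate (m + 1).toNat 0)).2) row0
  PySem.List.pyGetD row (-1) 0

-- ===== PRECONDITION & SPEC =====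
-- Pre_f excludes exactly m < 0, where the Python A raises IndexError (dp[0] = 0 on an empty list).
def Pre_f (m : Int) (n : Int) : Prop := 0 ≤ m
instance (m : Int) (n : Int) : Decidable (Pre_f m n) := by unfold Pre_f; infer_instance
def pvWitness_f : Int × Int := (3, 4)

-- On m < 0 with n ≤ 1 the Python A raises IndexError while B returns 0 (B's row is just [0]).
def Raises_f (m : Int) (n : Int) : Prop := m < 0 ∧ n ≤ 1
instance (m : Int) (n : Int) : Decidable (Raises_f m n) := by unfold Raises_f; infer_instance
def pvRaiseWitness_f : Int × Int := (-1, 0)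
def pvRaiseWitnessOut_f : Int := 0

def Spec_f (m : Int) (n : Int) (out : Int) : Prop := out = f_alt m n
instance (m : Int) (n : Int) (out : Int) : Decidable (Spec_f m n out) := by unfold Spec_f; infer_instance

-- ===== CLAIM (what is proved, stated in full; the proofs are below) =====
def Claim_equal_f : Prop := ∀ (m : Int) (n : Int), Dom_f m n → Pre_f m n → Spec_f m n (f m n)
def Claim_raises_f : Prop := (∀ (m : Int) (n : Int), Dom_f m n → Raises_f m n → ¬ Pre_f m n) ∧ (Dom_f (pvRaiseWitness_f.1) (pvRaiseWitness_f.2) ∧ Raises_f (pvRaiseWitness_f.1) (pvRaiseWitness_f.2) ∧ f_alt (pvRaiseWitness_f.1) (pvRaiseWitness_f.2) = pvRaiseWitnessOut_f)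

-- ===== LEMMAS AND PROOFS =====

-- the mathematical value of one new row entry: pvS c k = Σ_{i<k} (c[i] + c[i+1])
def pvS (c : List Int) (k : Nat) : Int :=
  ((List.range k).map (fun i => c.getD i 0 + c.getD (i + 1) 0)).sum

lemma pvS_succ (c : List Int) (k : Nat) :
    pvS c (k + 1) = pvS c k + (c.getD k 0 + c.getD (k + 1) 0) := by
  simp [pvS, List.range_succ]

-- the body of one outer iteration of A (reading from c, writing into dp), bound b = m+1
def pvStepA (c : List Int) (b : Int) (dp : List Int) : List Int :=
  (PySem.List.pyRange 1 b 1).foldl (fun dp k =>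
    PySem.List.pySetD dp k
      ((PySem.List.pyRange 0 k 1).foldl
        (fun acc i => acc + (PySem.List.pyGetD c i 0 + PySem.List.pyGetD c (i + 1) 0)) 0)) dp

-- the body of one outer iteration of B (reading from c), bound b = m+1
def pvStepB (c : List Int) (b : Int) (st : Int × List Int) : Int × List Int :=
  (PySem.List.pyRange 1 b 1).foldl
    (fun (st : Int × List Int) k =>
      (st.1 + (PySem.List.pyGetD c (k - 1) 0 + PySem.List.pyGetD c k 0),
        PySem.List.pySetD st.2 k (st.1 + (PySem.List.pyGetD c (k - 1) 0 + PySem.List.pyGetD c k 0)))) st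

lemma getD_set (xs : List Int) (n t : Nat) (v : Int) :
    (xs.set n v).getD t 0 = if n = t ∧ n < xs.length then v else xs.getD t 0 := by
  simp [List.getD_eq_getElem?_getD, List.getElem?_set]
  split_ifs with h1 h2 h3 <;> simp_all <;> omega

-- A's innermost loop computes pvS
lemma innerA (c : List Int) (k : Nat) :
    (PySem.List.pyRange 0 (k : Int) 1).foldl
      (fun acc i => acc + (PySem.List.pyGetD c i 0 + PySem.List.pyGetD c (i + 1) 0)) 0
    = pvS c k := by
  induction k with
  | zero => simp [PySem.List.pyRange_one_eq_nil, pvS]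
  | succ k ih =>
    have hk : ((k + 1 : Nat) : Int) = (k : Int) + 1 := by push_cast; ring
    rw [hk, PySem.List.pyRange_one_succ_right (by positivity), List.foldl_append, ih]
    have h1 : (PySem.List.pyGetD c ((k : Int) + 1) 0) = c.getD (k + 1) 0 := by
      rw [show ((k : Int) + 1) = ((k + 1 : Nat) : Int) by push_cast; ring,
        PySem.List.pyGetD_natCast]
    simp [pvS, List.range_succ, h1]

-- A's middle loop, run with bound j+1 (i.e. k = 1 .. j), characterised entrywise
lemma rowA_spec (c : List Int) (j : Nat) (dp : List Int) (hj : j < dp.length) :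
    (pvStepA c ((j : Int) + 1) dp).length = dp.length
    ∧ ∀ t : Nat, (pvStepA c ((j : Int) + 1) dp).getD t 0
        = if 1 ≤ t ∧ t ≤ j then pvS c t else dp.getD t 0 := by
  induction j with
  | zero =>
    unfold pvStepA
    rw [PySem.List.pyRange_one_eq_nil (by omega)]
    exact ⟨rfl, fun t => by rw [if_neg (by omega)]; rfl⟩
  | succ j ih =>
    obtain ⟨ihlen, ihget⟩ := ih (by omega)
    have hc : ((j + 1 : Nat) : Int) + 1 = ((j : Int) + 1) + 1 := by push_cast; ring
    unfold pvStepA at *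
    rw [hc, PySem.List.pyRange_one_succ_right (by omega), List.foldl_append]
    simp only [List.foldl_cons, List.foldl_nil]
    have hk : ((j : Int) + 1) = ((j + 1 : Nat) : Int) := by push_cast; ring
    rw [hk]
    rw [hk] at ihlen ihget
    rw [PySem.List.pySetD_natCast, innerA c (j + 1)]
    refine ⟨by rw [List.length_set, ihlen], fun t => ?_⟩
    rw [getD_set, ihget t, ihlen]
    by_cases ht : t = j + 1
    · subst ht
      rw [if_pos ⟨rfl, by omega⟩, if_pos (by omega)]
    · rw [if_neg (fun h => ht h.1.symm)]
      split_ifs with h1 h2 <;> first | rfl | omega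

-- B's loop body, run with bound j+1, characterised entrywise (first component = running sum)
lemma rowB_spec (c : List Int) (j : Nat) (new : List Int) (hj : j < new.length) :
    (pvStepB c ((j : Int) + 1) (0, new)).1 = pvS c j
    ∧ (pvStepB c ((j : Int) + 1) (0, new)).2.length = new.length
    ∧ ∀ t : Nat, (pvStepB c ((j : Int) + 1) (0, new)).2.getD t 0
        = if 1 ≤ t ∧ t ≤ j then pvS c t else new.getD t 0 := by
  induction j with
  | zero =>
    unfold pvStepB
    rw [PySem.List.pyRange_one_eq_nil (by omega)]
    exact ⟨by simp [pvS], rfl, fun t => by rw [if_neg (by omega)]; rfl⟩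
  | succ j ih =>
    obtain ⟨ihs, ihlen, ihget⟩ := ih (by omega)
    have hc : ((j + 1 : Nat) : Int) + 1 = ((j : Int) + 1) + 1 := by push_cast; ring
    unfold pvStepB at *
    rw [hc, PySem.List.pyRange_one_succ_right (by omega), List.foldl_append]
    simp only [List.foldl_cons, List.foldl_nil]
    have hk : ((j : Int) + 1) = ((j + 1 : Nat) : Int) := by push_cast; ring
    have hk1 : ((j + 1 : Nat) : Int) - 1 = ((j : Nat) : Int) := by push_cast; ring
    rw [hk]
    rw [hk] at ihs ihlen ihget
    simp only [hk1, PySem.List.pyGetD_natCast, PySem.List.pySetD_natCast]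
    rw [ihs]
    have hs : pvS c j + (c.getD j 0 + c.getD (j + 1) 0) = pvS c (j + 1) := (pvS_succ c j).symm
    refine ⟨hs, by rw [List.length_set, ihlen], fun t => ?_⟩
    rw [getD_set, ihget t, ihlen, hs]
    by_cases ht : t = j + 1
    · subst ht
      rw [if_pos ⟨rfl, by omega⟩, if_pos (by omega)]
    · rw [if_neg (fun h => ht h.1.symm)]
      split_ifs with h1 h2 <;> first | rfl | omega

-- one outer iteration of A and of B produce the same row (given the row invariant)
lemma step_eq (M : Nat) (c : List Int) (hlen : c.length = M + 1) (h0 : c.getD 0 0 = 0) :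
    pvStepA c ((M : Int) + 1) c = (pvStepB c ((M : Int) + 1) (0, List.replicate (M + 1) 0)).2 := by
  obtain ⟨hAlen, hAget⟩ := rowA_spec c M c (by omega)
  obtain ⟨_, hBlen, hBget⟩ := rowB_spec c M (List.replicate (M + 1) (0 : Int)) (by simp)
  apply List.ext_getElem
  · rw [hAlen, hBlen, hlen, List.length_replicate]
  · intro i h1 h2
    have hi : i < M + 1 := by rw [hAlen, hlen] at h1; exact h1
    rw [← List.getD_eq_getElem _ 0 h1, ← List.getD_eq_getElem _ 0 h2, hAget i, hBget i]
    split_ifs with h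
    · rfl
    · have : i = 0 := by omega
      subst this
      rw [h0]
      simp
-- the row invariant after one iteration of B
lemma stepB_inv (M : Nat) (c : List Int) :
    (pvStepB c ((M : Int) + 1) (0, List.replicate (M + 1) 0)).2.length = M + 1
    ∧ (pvStepB c ((M : Int) + 1) (0, List.replicate (M + 1) 0)).2.getD 0 0 = 0 := by
  obtain ⟨_, hBlen, hBget⟩ := rowB_spec c M (List.replicate (M + 1) (0 : Int)) (by simp)
  refine ⟨by rw [hBlen, List.length_replicate], ?_⟩
  rw [hBget 0, if_neg (by omega)]
  simp

-- the two outer loops coincide for any number of iterations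
lemma outer_eq (M : Nat) (L : List Int) : ∀ c : List Int, c.length = M + 1 → c.getD 0 0 = 0 →
    L.foldl (fun dp _ => pvStepA dp ((M : Int) + 1) dp) c
    = L.foldl (fun row _ => (pvStepB row ((M : Int) + 1) (0, List.replicate (M + 1) 0)).2) c := by
  induction L with
  | nil => intro c _ _; rfl
  | cons a L ih =>
    intro c hlen h0
    simp only [List.foldl_cons]
    rw [step_eq M c hlen h0]
    exact ih _ (stepB_inv M c).1 (stepB_inv M c).2

theorem f_spec : Claim_equal_f := by
  intro m n _ hpre
  unfold Spec_f
  obtain ⟨M, rfl⟩ : ∃ M : Nat, m = (M : Int) := ⟨m.toNat, by unfold Pre_f at hpre; omega⟩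
  show PySem.List.pyGetD
      ((PySem.List.pyRange 0 (n - 1) 1).foldl (fun dp _ => pvStepA dp ((M : Int) + 1) dp)
        (PySem.List.pySetD (List.replicate ((M : Int) + 1).toNat 1) 0 0)) (-1) 0
    = PySem.List.pyGetD
      ((PySem.List.pyRange 0 (n - 1) 1).foldl
        (fun row _ => (pvStepB row ((M : Int) + 1) (0, List.replicate ((M : Int) + 1).toNat 0)).2)
        (0 :: List.replicate ((M : Int)).toNat 1)) (-1) 0
  have htN : ((M : Int) + 1).toNat = M + 1 := by omega
  have htM : ((M : Int)).toNat = M := by omega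
  rw [htN, htM]
  have hinit : PySem.List.pySetD (List.replicate (M + 1) (1 : Int)) 0 0
      = 0 :: List.replicate M 1 := by
    rw [show (0 : Int) = ((0 : Nat) : Int) from rfl, PySem.List.pySetD_natCast]
    simp [List.replicate_succ]
  rw [hinit, outer_eq M (PySem.List.pyRange 0 (n - 1) 1) (0 :: List.replicate M 1) (by simp) (by simp)]

@[simp]
theorem f_raises : Claim_raises_f := by
  unfold Claim_raises_f
  exact ⟨fun m n _ h => by unfold Raises_f at h; unfold Pre_f; omega, by decide⟩
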